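-- pv_equiv track=rewrite | github.com/JoxanF/proyecto-1-algoritmos | Desicion tree from scratch/createDataset.py | getValuesByResult
-- ===== SOURCE A (Python) =====
-- def getValuesByResult(dataset):
--     matrix = [
--         [[],[],[],[]],
--         [[],[],[],[]]
--         ]
--     for line in dataset:
--         if (line[4] == 0):
--             matrix[0][0].append( line[0])
--             matrix[0][1].append( line[1])
--             matrix[0][2].append( line[2])
--             matrix[0][3].append( line[3])
--
--         elif (line[4] == 1):
--             matrix[1][0].append( line[0])
--             matrix[1][1].append( line[1])
--             matrix[1][2].append( line[2])
--             matrix[1][3].append( line[3])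
--
--     return matrix
-- ===== SOURCE B (Python) =====
-- def getValuesByResult(dataset):
--     return [[[line[c] for line in dataset if line[4] == r] for c in range(4)]
--             for r in (0, 1)]
-- ===== Notes on version B (the rewrite author's own statement) =====
-- stated objective: idiomatic
-- what changed: Replaces the single branching loop that mutates a prebuilt matrix of append targets with nested comprehensions that build each column list directly by filtering the dataset per label (multi-pass instead of single-pass).
import Mathlib
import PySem

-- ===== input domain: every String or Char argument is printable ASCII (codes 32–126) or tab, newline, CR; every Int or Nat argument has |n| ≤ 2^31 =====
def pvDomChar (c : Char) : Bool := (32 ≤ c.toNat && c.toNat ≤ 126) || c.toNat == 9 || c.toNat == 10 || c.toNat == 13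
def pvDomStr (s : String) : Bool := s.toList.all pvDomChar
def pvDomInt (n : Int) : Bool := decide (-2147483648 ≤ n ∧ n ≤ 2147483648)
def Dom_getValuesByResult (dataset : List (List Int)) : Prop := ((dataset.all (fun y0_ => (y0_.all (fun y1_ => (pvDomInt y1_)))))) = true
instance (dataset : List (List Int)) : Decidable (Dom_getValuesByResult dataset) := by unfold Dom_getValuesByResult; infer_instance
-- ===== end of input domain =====

-- B builds each column list with nested filter-map comprehensions (per label, per column)
-- instead of A's single loop mutating a prebuilt matrix of append targets; objective: more idiomatic.


-- ===== PORT A =====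
-- line[i] under Pre_ (every line has length ≥ 5) is in range; `.getD 0` is unreachable there.
def pvGet (line : List Int) (i : Int) : Int := (PySem.List.pyGet? line i).getD 0

-- the loop over `dataset`, carrying the eight mutable column lists of `matrix`
def gvbrLoop (ds : List (List Int))
    (m00 m01 m02 m03 m10 m11 m12 m13 : List Int) : List (List (List Int)) :=
  match ds with
  | [] => [[m00, m01, m02, m03], [m10, m11, m12, m13]]
  | line :: rest =>
    if pvGet line 4 = 0 then
      gvbrLoop rest (m00 ++ [pvGet line 0]) (m01 ++ [pvGet line 1])
        (m02 ++ [pvGet line 2]) (m03 ++ [pvGet line 3]) m10 m11 m12 m13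
    else if pvGet line 4 = 1 then
      gvbrLoop rest m00 m01 m02 m03 (m10 ++ [pvGet line 0]) (m11 ++ [pvGet line 1])
        (m12 ++ [pvGet line 2]) (m13 ++ [pvGet line 3])
    else
      gvbrLoop rest m00 m01 m02 m03 m10 m11 m12 m13

def getValuesByResult (dataset : List (List Int)) : List (List (List Int)) :=
  gvbrLoop dataset [] [] [] [] [] [] [] []

-- ===== PORT B =====
-- [[[line[c] for line in dataset if line[4] == r] for c in range(4)] for r in (0, 1)]
def getValuesByResult_alt (dataset : List (List Int)) : List (List (List Int)) :=
  [(0 : Int), 1].map (fun r =>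
    (PySem.List.pyRange 0 4 1).map (fun c =>
      (dataset.filter (fun line => pvGet line 4 = r)).map (fun line => pvGet line c)))

-- ===== PRECONDITION & SPEC =====
-- Pre_ excludes lines of length < 5, on which A raises IndexError (B raises there too).
def Pre_getValuesByResult (dataset : List (List Int)) : Prop :=
  ∀ line ∈ dataset, 5 ≤ line.length
instance (dataset : List (List Int)) : Decidable (Pre_getValuesByResult dataset) := by
  unfold Pre_getValuesByResult; infer_instance
def pvWitness_getValuesByResult : List (List Int) :=
  [[1, 2, 3, 4, 0], [5, 6, 7, 8, 1], [9, 9, 9, 9, 2]]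
def Spec_getValuesByResult (dataset : List (List Int)) (out : List (List (List Int))) : Prop := out = getValuesByResult_alt dataset
instance (dataset : List (List Int)) (out : List (List (List Int))) : Decidable (Spec_getValuesByResult dataset out) := by unfold Spec_getValuesByResult; infer_instance

-- ===== CLAIM (what is proved, stated in full; the proofs are below) =====
def Claim_equal_getValuesByResult : Prop := ∀ (dataset : List (List Int)), Dom_getValuesByResult dataset → Pre_getValuesByResult dataset → Spec_getValuesByResult dataset (getValuesByResult dataset)

-- ===== LEMMAS AND PROOFS =====
-- one column of B's result
def gvbrCol (r c : Int) (ds : List (List Int)) : List Int :=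
  (ds.filter (fun line => pvGet line 4 = r)).map (fun line => pvGet line c)

theorem gvbrCol_cons (r c : Int) (l : List Int) (ds : List (List Int)) :
    gvbrCol r c (l :: ds) =
      (if pvGet l 4 = r then [pvGet l c] else []) ++ gvbrCol r c ds := by
  simp [gvbrCol, List.filter]
  split_ifs with h <;> simp [h]

theorem gvbrLoop_eq (ds : List (List Int))
    (m00 m01 m02 m03 m10 m11 m12 m13 : List Int) :
    gvbrLoop ds m00 m01 m02 m03 m10 m11 m12 m13 =
      [[m00 ++ gvbrCol 0 0 ds, m01 ++ gvbrCol 0 1 ds,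
        m02 ++ gvbrCol 0 2 ds, m03 ++ gvbrCol 0 3 ds],
       [m10 ++ gvbrCol 1 0 ds, m11 ++ gvbrCol 1 1 ds,
        m12 ++ gvbrCol 1 2 ds, m13 ++ gvbrCol 1 3 ds]] := by
  induction ds generalizing m00 m01 m02 m03 m10 m11 m12 m13 with
  | nil => simp [gvbrLoop, gvbrCol]
  | cons l t ih =>
    simp only [gvbrLoop, gvbrCol_cons]
    split_ifs with h0 h1 <;> simp_all

-- ===== VERDICT (by name: the statement is the Claim_ definition above) =====
theorem getValuesByResult_spec : Claim_equal_getValuesByResult := by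
  intro ds _ _
  show getValuesByResult ds = getValuesByResult_alt ds
  rw [getValuesByResult, gvbrLoop_eq]
  have hr : PySem.List.pyRange 0 4 1 = [0, 1, 2, 3] := by decide
  simp [getValuesByResult_alt, hr, gvbrCol]
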